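-- pv_equiv track=rewrite | github.com/shinminje20/MAPF_LNS2 | failureBasedNeighbourhood.py | deg
-- ===== SOURCE A (Python) =====
-- def compare(cord1, cord2):
--     if cord1[0] == cord2[0]:
--         if cord1[1] == cord2[1]:
--             return True
--
--     return False
--
-- def deg(path):
--     degList = []
--     deg = 0
--     for firstPath in range(0, len(path), 1):
--         for secondPath in range(0, len(path), 1):
--             if(path[firstPath] == path[secondPath]):
--                 continue
--             length = len(path[firstPath])
--             if (len(path[firstPath]) > len(path[secondPath])):
--                 length = len(path[secondPath])
--             for timestep in range(0, length, 1):
--                 if compare(path[firstPath][timestep], path[secondPath][timestep]):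
--                     deg += 1
--                     break
--         degList.append(deg)
--         deg = 0
--     return degList
-- ===== SOURCE B (Python) =====
-- def deg(path):
--     # Index every (timestep, cell) occupancy once, then collect for each path
--     # the distinct value-different paths it shares a cell+timestep with.
--     occ = {}
--     for j, p in enumerate(path):
--         for t, cell in enumerate(p):
--             key = (t, cell)
--             occ[key] = occ.get(key, []) + [j]
--     out = []
--     for i, p in enumerate(path):
--         partners = set()
--         for t, cell in enumerate(p):
--             for j in occ.get((t, cell), []):
--                 if path[j] != p:
--                     partners.add(j)
--         out.append(len(partners))
--     return out
-- ===== Notes on version B (the rewrite author's own statement) =====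
-- stated objective: faster
-- what changed: Replaces A's all-pairs scan over every timestep by a (timestep, cell) occupancy index built in one pass, then counts the distinct value-different partner paths per path from the index.
import Mathlib
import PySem

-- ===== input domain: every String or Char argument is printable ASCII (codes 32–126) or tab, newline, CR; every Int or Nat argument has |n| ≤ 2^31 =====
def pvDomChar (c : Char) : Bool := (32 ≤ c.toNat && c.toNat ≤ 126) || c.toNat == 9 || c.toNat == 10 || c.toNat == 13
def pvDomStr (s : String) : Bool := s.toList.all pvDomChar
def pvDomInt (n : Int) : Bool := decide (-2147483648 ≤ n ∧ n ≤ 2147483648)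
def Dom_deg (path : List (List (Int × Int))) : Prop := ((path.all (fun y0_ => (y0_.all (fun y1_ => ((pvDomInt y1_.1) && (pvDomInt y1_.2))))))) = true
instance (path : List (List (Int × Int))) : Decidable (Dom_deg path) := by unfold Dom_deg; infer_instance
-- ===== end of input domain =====

-- B replaces A's all-pairs × all-timesteps scan by a (timestep, cell) occupancy index
-- built in one pass, then counts distinct value-different partner paths per path.

-- ===== PORT A =====
-- compare(cord1, cord2)
def compareCoord (c1 c2 : Int × Int) : Bool :=
  if c1.1 = c2.1 then (if c1.2 = c2.2 then true else false) else false

-- 'for timestep in range(0, length, 1): if compare(...): deg += 1; break'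
-- (indices are always in range here — length ≤ both lengths — so getD is exact)
def degTimeLoop (p q : List (Int × Int)) : List Nat → Bool
  | [] => false
  | t :: rest =>
    if compareCoord (p.getD t (0, 0)) (q.getD t (0, 0)) then true
    else degTimeLoop p q rest

-- inner 'for secondPath in range(0, len(path), 1)' with accumulator deg
def degInner (path : List (List (Int × Int))) (pi : List (Int × Int)) :
    List Nat → Int → Int
  | [], d => d
  | j :: js, d =>
    let pj := path.getD j []
    if pi = pj then degInner path pi js d
    else
      let length := if pi.length > pj.length then pj.length else pi.length
      if degTimeLoop pi pj (List.range length) then degInner path pi js (d + 1)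
      else degInner path pi js d

def deg (path : List (List (Int × Int))) : List Int :=
  (List.range path.length).foldl
    (fun degList i =>
      degList ++ [degInner path (path.getD i []) (List.range path.length) 0]) []

-- ===== PORT B =====
-- 'occ[key] = occ.get(key, []) + [j]' over enumerate(path) / enumerate(p)
def occIndex (path : List (List (Int × Int))) :
    PySem.Dict (Int × (Int × Int)) (List Int) :=
  (PySem.List.enumerate path).foldl
    (fun occ jp =>
      (PySem.List.enumerate jp.2).foldl
        (fun occ tc => occ.modify (tc.1, tc.2) [] (· ++ [jp.1])) occ)
    PySem.Dict.empty

def deg_alt (path : List (List (Int × Int))) : List Int :=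
  let occ := occIndex path
  (PySem.List.enumerate path).foldl
    (fun out ip =>
      let partners : PySem.Set Int :=
        (PySem.List.enumerate ip.2).foldl
          (fun s tc =>
            (occ.getD (tc.1, tc.2) []).foldl
              (fun s j =>
                if PySem.List.pyGetD path j [] ≠ ip.2 then PySem.Set.add s j else s) s)
          PySem.Set.empty
      out ++ [(partners.length : Int)])
    []

-- ===== PRECONDITION & SPEC =====
def Spec_deg (path : List (List (Int × Int))) (out : List Int) : Prop := out = deg_alt path
instance (path : List (List (Int × Int))) (out : List Int) : Decidable (Spec_deg path out) := by unfold Spec_deg; infer_instance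

-- ===== CLAIM (what is proved, stated in full; the proofs are below) =====
def Claim_equal_deg : Prop := ∀ (path : List (List (Int × Int))), Dom_deg path → Spec_deg path (deg path)

-- ===== LEMMAS AND PROOFS =====

-- the j-predicate A's inner loop tests (literal body of the loop step)
def qA (path : List (List (Int × Int))) (pi : List (Int × Int)) (j : Nat) : Bool :=
  let pj := path.getD j []
  if pi = pj then false
  else degTimeLoop pi pj (List.range (if pi.length > pj.length then pj.length else pi.length))

lemma compareCoord_eq_true_iff (c1 c2 : Int × Int) : compareCoord c1 c2 = true ↔ c1 = c2 := by
  unfold compareCoord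
  split_ifs with h1 h2 <;> simp [Prod.ext_iff, *]

lemma degTimeLoop_eq_any (p q : List (Int × Int)) (ts : List Nat) :
    degTimeLoop p q ts = ts.any (fun t => compareCoord (p.getD t (0, 0)) (q.getD t (0, 0))) := by
  induction ts with
  | nil => rfl
  | cons t rest ih => by_cases h : compareCoord (p.getD t (0,0)) (q.getD t (0,0)) = true <;>
      simp [degTimeLoop, ih]

lemma degInner_eq_countP (path : List (List (Int × Int))) (pi : List (Int × Int))
    (js : List Nat) (d : Int) :
    degInner path pi js d = d + (js.countP (qA path pi) : Int) := by
  induction js generalizing d with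
  | nil => simp [degInner]
  | cons j js ih =>
    simp only [degInner, List.countP_cons, qA]
    split_ifs with h1 h2 <;> rw [ih] <;> simp <;> omega

-- flat list of ((timestep, cell), path-index) occupancy records
def occPairs (path : List (List (Int × Int))) : List ((Int × (Int × Int)) × Int) :=
  (PySem.List.enumerate path).flatMap
    (fun jp => (PySem.List.enumerate jp.2).map (fun tc => ((tc.1, tc.2), jp.1)))

lemma occIndex_eq_foldl (path : List (List (Int × Int))) :
    occIndex path = (occPairs path).foldl
      (fun d pr => d.modify pr.1 [] (· ++ [pr.2])) PySem.Dict.empty := by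
  unfold occIndex occPairs
  rw [List.foldl_flatMap]
  simp only [List.foldl_map]

lemma mem_occ_getD (path : List (List (Int × Int))) (c : Int × (Int × Int)) (y : Int) :
    y ∈ (occIndex path).getD c [] ↔ ((c, y) ∈ occPairs path) := by
  rw [occIndex_eq_foldl, PySem.Dict.getD_foldl_modify_append]
  simp only [PySem.Dict.getD_empty, List.nil_append, List.mem_map, List.mem_filter]
  constructor
  · rintro ⟨pr, ⟨hm, hc⟩, hy⟩
    have h1 : pr.1 = c := by simpa using hc
    have : pr = (c, y) := by
      obtain ⟨a, b⟩ := pr; simp only [Prod.mk.injEq]; exact ⟨h1, hy⟩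
    exact this ▸ hm
  · intro hm; exact ⟨(c, y), ⟨hm, by simp⟩, rfl⟩

-- membership in a conditional-add set fold
lemma mem_foldl_add_ite {P : Int → Prop} [DecidablePred P] (l : List Int) (s : PySem.Set Int) (y : Int) :
    y ∈ l.foldl (fun s j => if P j then PySem.Set.add s j else s) s ↔
      y ∈ s ∨ (y ∈ l ∧ P y) := by
  induction l generalizing s with
  | nil => simp
  | cons j js ih =>
    by_cases h : P j
    · simp only [List.foldl_cons, if_pos h, ih, PySem.Set.mem_add, List.mem_cons]
      constructor
      · rintro (⟨hs | rfl⟩ | h2)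
        · exact Or.inl hs
        · exact Or.inr ⟨Or.inl rfl, h⟩
        · exact Or.inr ⟨Or.inr h2.1, h2.2⟩
      · rintro (hs | ⟨rfl | hm, hp⟩)
        · exact Or.inl (Or.inl hs)
        · exact Or.inl (Or.inr rfl)
        · exact Or.inr ⟨hm, hp⟩
    · simp only [List.foldl_cons, if_neg h, ih, List.mem_cons]
      constructor
      · rintro (hs | h2); · exact Or.inl hs
        · exact Or.inr ⟨Or.inr h2.1, h2.2⟩
      · rintro (hs | ⟨rfl | hm, hp⟩)
        · exact Or.inl hs
        · exact absurd hp h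
        · exact Or.inr ⟨hm, hp⟩

lemma nodup_foldl_add_ite {P : Int → Prop} [DecidablePred P] (l : List Int) (s : PySem.Set Int)
    (hs : s.Nodup) :
    (l.foldl (fun s j => if P j then PySem.Set.add s j else s) s).Nodup := by
  induction l generalizing s with
  | nil => exact hs
  | cons j js ih =>
    simp only [List.foldl_cons]
    split_ifs with h
    · exact ih _ (PySem.Set.nodup_add s j hs)
    · exact ih _ hs

-- the nested (per-timestep, per-occupant) version of the two lemmas above
lemma mem_foldl_foldl_add_ite {α : Type} {Q : Int → Prop} [DecidablePred Q]
    (g : α → List Int) (L : List α) (s : PySem.Set Int) (y : Int) :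
    y ∈ L.foldl (fun s tc =>
        (g tc).foldl (fun s j => if Q j then PySem.Set.add s j else s) s) s ↔
      y ∈ s ∨ ∃ tc ∈ L, y ∈ g tc ∧ Q y := by
  induction L generalizing s with
  | nil => simp
  | cons tc L ih =>
    simp only [List.foldl_cons, ih, mem_foldl_add_ite, List.mem_cons]
    constructor
    · rintro ((hs | h1) | ⟨tc', hm, h⟩)
      · exact Or.inl hs
      · exact Or.inr ⟨tc, Or.inl rfl, h1⟩
      · exact Or.inr ⟨tc', Or.inr hm, h⟩
    · rintro (hs | ⟨tc', rfl | hm, h⟩)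
      · exact Or.inl (Or.inl hs)
      · exact Or.inl (Or.inr h)
      · exact Or.inr ⟨tc', hm, h⟩

lemma nodup_foldl_foldl_add_ite {α : Type} {Q : Int → Prop} [DecidablePred Q]
    (g : α → List Int) (L : List α) (s : PySem.Set Int) (hs : s.Nodup) :
    (L.foldl (fun s tc =>
        (g tc).foldl (fun s j => if Q j then PySem.Set.add s j else s) s) s).Nodup := by
  induction L generalizing s with
  | nil => exact hs
  | cons tc L ih => exact ih _ (nodup_foldl_add_ite _ _ hs)

-- the partner set B builds for one path p
def partnersOf (path : List (List (Int × Int))) (p : List (Int × Int)) : PySem.Set Int :=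
  (PySem.List.enumerate p).foldl
    (fun s tc =>
      ((occIndex path).getD (tc.1, tc.2) []).foldl
        (fun s j =>
          if PySem.List.pyGetD path j [] ≠ p then PySem.Set.add s j else s) s)
    PySem.Set.empty

lemma mem_partnersOf (path : List (List (Int × Int))) (p : List (Int × Int)) (y : Int) :
    y ∈ partnersOf path p ↔
      ∃ tc ∈ PySem.List.enumerate p 0,
        y ∈ (occIndex path).getD (tc.1, tc.2) [] ∧ PySem.List.pyGetD path y [] ≠ p := by
  unfold partnersOf
  have h := mem_foldl_foldl_add_ite (Q := fun j => PySem.List.pyGetD path j [] ≠ p)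
      (fun tc => (occIndex path).getD (tc.1, tc.2) []) (PySem.List.enumerate p) PySem.Set.empty y
  exact h.trans (by simp [PySem.Set.empty])

lemma nodup_partnersOf (path : List (List (Int × Int))) (p : List (Int × Int)) :
    (partnersOf path p).Nodup := by
  exact nodup_foldl_foldl_add_ite _ _ _ List.nodup_nil

-- unpacked membership: y is a partner of path[k] iff y = some j with qA true
lemma mem_partners_iff (path : List (List (Int × Int))) (k : Nat) (hk : k < path.length)
    (y : Int) :
    y ∈ partnersOf path path[k] ↔
      ∃ j : Nat, j < path.length ∧ qA path path[k] j = true ∧ y = (j : Int) := by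
  rw [mem_partnersOf]
  constructor
  · rintro ⟨tc, htc, hocc, hne⟩
    rw [PySem.List.mem_enumerate_iff] at htc
    obtain ⟨s, hs, rfl⟩ := htc
    rw [mem_occ_getD] at hocc
    simp only [occPairs, List.mem_flatMap, List.mem_map] at hocc
    obtain ⟨jp, hjp, tc', htc', heq⟩ := hocc
    rw [PySem.List.mem_enumerate_iff] at hjp htc'
    obtain ⟨j, hj, rfl⟩ := hjp
    obtain ⟨t, ht, rfl⟩ := htc'
    simp only [zero_add, Prod.mk.injEq] at heq
    obtain ⟨⟨hts, hcell⟩, hy⟩ := heq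
    have hts' : t = s := by exact_mod_cast hts
    subst hts'
    refine ⟨j, hj, ?_, hy.symm⟩
    have hgd : path.getD j [] = path[j] := List.getD_eq_getElem path [] hj
    have hnep : ¬ (path[k] = path.getD j []) := by
      rw [hgd]
      intro hcontra
      apply hne
      rw [← hy, PySem.List.pyGetD_natCast, hgd, hcontra]
    unfold qA
    rw [if_neg hnep, degTimeLoop_eq_any, List.any_eq_true]
    refine ⟨t, ?_, ?_⟩
    · rw [List.mem_range, hgd]
      split_ifs <;> omega
    · rw [compareCoord_eq_true_iff, hgd,
        List.getD_eq_getElem _ _ hs, List.getD_eq_getElem _ _ ht, hcell]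
  · rintro ⟨j, hj, hq, rfl⟩
    have hgd : path.getD j [] = path[j] := List.getD_eq_getElem path [] hj
    unfold qA at hq
    by_cases hne : path[k] = path.getD j []
    · rw [if_pos hne] at hq; exact absurd hq (by simp)
    · rw [if_neg hne, degTimeLoop_eq_any, List.any_eq_true] at hq
      obtain ⟨t, htm, hcmp⟩ := hq
      rw [List.mem_range] at htm
      have htk : t < path[k].length := by rw [hgd] at htm; split_ifs at htm <;> omega
      have htj : t < path[j].length := by rw [hgd] at htm; split_ifs at htm <;> omega
      rw [compareCoord_eq_true_iff, List.getD_eq_getElem _ _ htk, hgd,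
        List.getD_eq_getElem _ _ htj] at hcmp
      refine ⟨((0 : Int) + t, path[k][t]), ?_, ?_, ?_⟩
      · rw [PySem.List.mem_enumerate_iff]; exact ⟨t, htk, rfl⟩
      · rw [mem_occ_getD]
        simp only [occPairs, List.mem_flatMap, List.mem_map]
        refine ⟨((0 : Int) + j, path[j]), ?_, ((0 : Int) + t, path[j][t]), ?_, ?_⟩
        · rw [PySem.List.mem_enumerate_iff]; exact ⟨j, hj, rfl⟩
        · rw [PySem.List.mem_enumerate_iff]; exact ⟨t, htj, rfl⟩
        · simp [hcmp]
      · rw [PySem.List.pyGetD_natCast, hgd]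
        intro hcontra
        exact hne (by rw [hgd, hcontra])

-- main per-index count equality
lemma partners_length_eq (path : List (List (Int × Int))) (k : Nat) (hk : k < path.length) :
    ((partnersOf path path[k]).length : Int)
      = ((List.range path.length).countP (qA path path[k]) : Int) := by
  have hn := nodup_partnersOf path path[k]
  have hMnodup : (((List.range path.length).filter (qA path path[k])).map
      (fun j => Int.ofNat j)).Nodup :=
    ((List.nodup_range).filter _).map (fun _ _ h => Int.ofNat.inj h)
  have hperm : (partnersOf path path[k]).Perm
      (((List.range path.length).filter (qA path path[k])).map (fun j => Int.ofNat j)) := by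
    rw [List.perm_ext_iff_of_nodup hn hMnodup]
    intro y
    rw [mem_partners_iff path k hk]
    simp only [List.mem_map, List.mem_filter, List.mem_range]
    constructor
    · rintro ⟨j, hj, hq, rfl⟩; exact ⟨j, ⟨hj, hq⟩, rfl⟩
    · rintro ⟨j, ⟨hj, hq⟩, rfl⟩; exact ⟨j, hj, hq, rfl⟩
  rw [hperm.length_eq, List.length_map, List.countP_eq_length_filter]

-- ===== VERDICT (by name: the statement is the Claim_ definition above) =====
theorem deg_spec : Claim_equal_deg := by
  intro path _
  unfold Spec_deg deg deg_alt
  rw [PySem.List.foldl_append_singleton_eq_map, PySem.List.foldl_append_singleton_eq_map]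
  simp only [List.nil_append]
  apply List.ext_getElem
  · simp [PySem.List.length_enumerate]
  · intro m h1 h2
    simp only [List.length_map, List.length_range] at h1
    simp only [List.getElem_map, List.getElem_range, PySem.List.getElem_enumerate]
    have hget : path.getD m [] = path[m] := List.getD_eq_getElem path [] h1
    rw [hget, degInner_eq_countP, ← partners_length_eq path m h1, zero_add]
    rfl
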